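-- pv_equiv track=rewrite | github.com/ChahelPaatur/Self-Modifying-Program-Synthesis-via-Online-Library-Evolution | models/hybrid_ultra/solver.py | remove_isolated
-- ===== SOURCE A (Python) =====
-- def remove_isolated(grid, bg=0):
--     """Remove isolated pixels"""
--     if not grid:
--         return grid
--     h, w = len(grid), len(grid[0])
--     result = [row[:] for row in grid]
--     for r in range(h):
--         for c in range(w):
--             if grid[r][c] != bg:
--                 has_neighbor = any(
--                     0 <= r+dr < h and 0 <= c+dc < w and grid[r+dr][c+dc] == grid[r][c]
--                     for dr, dc in [(-1,0), (1,0), (0,-1), (0,1)]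
--                 )
--                 if not has_neighbor:
--                     result[r][c] = bg
--     return result
-- ===== SOURCE B (Python) =====
-- def remove_isolated(grid, bg=0):
--     """Remove isolated pixels (edge-pass reimplementation)."""
--     if not grid:
--         return grid
--     h, w = len(grid), len(grid[0])
--     horiz = [p for r in range(h) for c in range(w - 1)
--              if grid[r][c] == grid[r][c + 1] != bg
--              for p in ((r, c), (r, c + 1))]
--     vert = [p for c in range(w) for r in range(h - 1)
--             if grid[r][c] == grid[r + 1][c] != bg
--             for p in ((r, c), (r + 1, c))]
--     kept = set(horiz + vert)
--     return [[grid[r][c] if grid[r][c] == bg or (r, c) in kept else bg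
--              for c in range(w)]
--             for r in range(h)]
-- ===== Notes on version B (the rewrite author's own statement) =====
-- stated objective: alternative
-- what changed: Instead of a per-cell 4-neighbor any() probe, B makes two edge passes (right-neighbor and down-neighbor equalities) collecting the coordinates of every cell in a same-colored non-bg adjacent pair into a set, then rebuilds the grid keeping exactly those cells.
-- outside the precondition, e.g. on remove_isolated([[1, 1], [1, 1, 5]], 0): A returns [[1, 1], [1, 1, 5]], B returns [[1, 1], [1, 1]]
import Mathlib
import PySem

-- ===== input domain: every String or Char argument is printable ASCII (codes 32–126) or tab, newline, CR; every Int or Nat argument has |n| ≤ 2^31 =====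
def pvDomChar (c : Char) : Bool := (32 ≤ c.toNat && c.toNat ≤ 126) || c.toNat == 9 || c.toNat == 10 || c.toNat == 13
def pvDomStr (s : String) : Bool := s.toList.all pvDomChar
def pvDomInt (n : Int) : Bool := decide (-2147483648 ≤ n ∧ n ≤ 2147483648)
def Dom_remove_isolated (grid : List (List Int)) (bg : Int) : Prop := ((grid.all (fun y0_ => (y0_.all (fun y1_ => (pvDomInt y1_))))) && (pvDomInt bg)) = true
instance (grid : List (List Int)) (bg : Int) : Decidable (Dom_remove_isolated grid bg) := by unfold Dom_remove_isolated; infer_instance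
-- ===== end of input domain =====

-- B replaces A's per-cell 4-neighbor probe by two edge passes building a kept-set of
-- paired cells, then rebuilds the grid from it (alternative decomposition, same cost).

-- ===== PORT A =====
def riHasNeighbor (grid : List (List Int)) (h w : Nat) (r c : Nat) (v : Int) : Bool :=
  [((-1 : Int), (0 : Int)), (1, 0), (0, -1), (0, 1)].any (fun d =>
    decide (0 ≤ (r : Int) + d.1) && decide ((r : Int) + d.1 < (h : Int)) &&
    decide (0 ≤ (c : Int) + d.2) && decide ((c : Int) + d.2 < (w : Int)) &&
    (((grid.getD ((r : Int) + d.1).toNat []).getD ((c : Int) + d.2).toNat 0) == v))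

def remove_isolated (grid : List (List Int)) (bg : Int) : List (List Int) :=
  if grid.isEmpty then grid else
  let h := grid.length
  let w := (grid.getD 0 []).length
  (List.range h).foldl (fun result r =>
    (List.range w).foldl (fun result c =>
      let v := (grid.getD r []).getD c 0
      if v ≠ bg then
        if ¬ (riHasNeighbor grid h w r c v = true) then
          result.modify r (fun row => row.set c bg)
        else result
      else result) result) grid

-- ===== PORT B =====
def remove_isolated_alt (grid : List (List Int)) (bg : Int) : List (List Int) :=
  if grid.isEmpty then grid else
  let h := grid.length
  let w := (grid.getD 0 []).length
  let horiz : List (Nat × Nat) := (List.range h).flatMap (fun r => (List.range (w - 1)).flatMap (fun c =>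
    if (grid.getD r []).getD c 0 = (grid.getD r []).getD (c+1) 0 ∧ (grid.getD r []).getD (c+1) 0 ≠ bg
    then [(r, c), (r, c+1)] else []))
  let vert : List (Nat × Nat) := (List.range w).flatMap (fun c => (List.range (h - 1)).flatMap (fun r =>
    if (grid.getD r []).getD c 0 = (grid.getD (r+1) []).getD c 0 ∧ (grid.getD (r+1) []).getD c 0 ≠ bg
    then [(r, c), (r+1, c)] else []))
  let kept : PySem.Set (Nat × Nat) := PySem.Set.ofList (horiz ++ vert)
  (List.range h).map (fun r => (List.range w).map (fun c =>
    let v := (grid.getD r []).getD c 0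
    if v = bg ∨ PySem.Set.contains kept (r, c) then v else bg))

-- ===== PRECONDITION & SPEC =====
-- Pre_ excludes non-rectangular grids: on them A raises IndexError when some row is
-- shorter than row 0, and when a row is longer its extra cells survive untouched only
-- as an artefact of A iterating row-0's width while copying whole rows.
def Pre_remove_isolated (grid : List (List Int)) (bg : Int) : Prop :=
  ∀ row ∈ grid, row.length = (grid.getD 0 []).length
instance (grid : List (List Int)) (bg : Int) : Decidable (Pre_remove_isolated grid bg) := by unfold Pre_remove_isolated; infer_instance
def pvWitness_remove_isolated : List (List Int) × Int := ([[1, 1, 0], [0, 2, 0]], 0)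
def Spec_remove_isolated (grid : List (List Int)) (bg : Int) (out : List (List Int)) : Prop := out = remove_isolated_alt grid bg
instance (grid : List (List Int)) (bg : Int) (out : List (List Int)) : Decidable (Spec_remove_isolated grid bg out) := by unfold Spec_remove_isolated; infer_instance

-- ===== CLAIM (what is proved, stated in full; the proofs are below) =====
def Claim_equal_remove_isolated : Prop := ∀ (grid : List (List Int)) (bg : Int), Dom_remove_isolated grid bg → Pre_remove_isolated grid bg → Spec_remove_isolated grid bg (remove_isolated grid bg)

-- ===== LEMMAS AND PROOFS =====

-- cell accessor shared by the proofs
def riC (grid : List (List Int)) (r c : Nat) : Int := (grid.getD r []).getD c 0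

theorem riModify_modify {α : Type} (l : List α) (i : Nat) (f g : α → α) :
    (l.modify i f).modify i g = l.modify i (fun x => g (f x)) := by
  apply List.ext_getElem?
  intro j
  simp only [List.getElem?_modify]
  cases l[j]? <;> simp <;> split <;> simp

theorem riModify_id {α : Type} (l : List α) (i : Nat) :
    l.modify i (fun x => x) = l := by
  apply List.ext_getElem?
  intro j
  simp only [List.getElem?_modify]
  cases l[j]? <;> simp

-- inner loop of A: the fold of guarded modifies of the fixed row r equals one modify
theorem riInner (grid : List (List Int)) (bg : Int) (h w r : Nat) (l : List Nat) :
    ∀ res : List (List Int),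
    l.foldl (fun result c =>
      let v := (grid.getD r []).getD c 0
      if v ≠ bg then
        if ¬ (riHasNeighbor grid h w r c v = true) then
          result.modify r (fun row => row.set c bg)
        else result
      else result) res
    = res.modify r (fun row => l.foldl (fun row c =>
        if riC grid r c ≠ bg ∧ ¬ (riHasNeighbor grid h w r c (riC grid r c) = true)
        then row.set c bg else row) row) := by
  have hstep : ∀ (res : List (List Int)) (c : Nat),
      (let v := (grid.getD r []).getD c 0
       if v ≠ bg then
         if ¬ (riHasNeighbor grid h w r c v = true) then
           res.modify r (fun row => row.set c bg)
         else res
       else res)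
      = if riC grid r c ≠ bg ∧ ¬ (riHasNeighbor grid h w r c (riC grid r c) = true)
        then res.modify r (fun row => row.set c bg) else res := by
    intro res c
    simp only [riC]
    split_ifs <;> tauto
  induction l with
  | nil => intro res; simp [riModify_id]
  | cons c l ih =>
    intro res
    rw [List.foldl_cons, hstep]
    by_cases h1 : riC grid r c ≠ bg ∧ ¬ (riHasNeighbor grid h w r c (riC grid r c) = true)
    · rw [if_pos h1, ih, riModify_modify]
      congr 1
      funext row
      rw [List.foldl_cons, if_pos h1]
    · rw [if_neg h1, ih]
      congr 1
      funext row
      rw [List.foldl_cons, if_neg h1]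

-- outer loop of A: fold of modifies at 0..n-1, read back elementwise
theorem riOuter (g : Nat → List Int → List Int) (init : List (List Int)) (n : Nat) (i : Nat) :
    ((List.range n).foldl (fun res r => res.modify r (g r)) init)[i]? =
      if i < n then (init[i]?).map (g i) else init[i]? := by
  induction n with
  | zero => simp
  | succ n ih =>
    rw [List.range_succ, List.foldl_append]
    simp only [List.foldl_cons, List.foldl_nil, List.getElem?_modify]
    rcases Nat.lt_trichotomy i n with hlt | heq | hgt
    · simp [ih, hlt, Nat.lt_succ_of_lt hlt]
      cases init[i]? <;> simp [Nat.ne_of_gt hlt]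
    · subst heq
      simp [ih]
    · have h1 : ¬ i < n := by omega
      have h2 : ¬ i < n + 1 := by omega
      simp [ih, h1, h2]
      cases init[i]? <;> simp [show n ≠ i by omega]

theorem riRowLen (p : Nat → Prop) [DecidablePred p] (bg : Int) (l : List Nat) (row : List Int) :
    (l.foldl (fun row c => if p c then row.set c bg else row) row).length = row.length := by
  induction l generalizing row with
  | nil => rfl
  | cons c l ih =>
    rw [List.foldl_cons]
    split_ifs <;> simp [ih]

-- row effect of A: fold of guarded sets over 0..n-1, read back elementwise
theorem riRow (p : Nat → Prop) [DecidablePred p] (bg : Int) (n : Nat) (row : List Int) (j : Nat) :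
    ((List.range n).foldl (fun row c => if p c then row.set c bg else row) row)[j]? =
      if j < n ∧ p j ∧ j < row.length then some bg else row[j]? := by
  induction n with
  | zero => simp
  | succ n ih =>
    rw [List.range_succ, List.foldl_append]
    simp only [List.foldl_cons, List.foldl_nil]
    have hlen := riRowLen p bg (List.range n) row
    by_cases hp : p n
    · rw [if_pos hp, List.getElem?_set, hlen, ih]
      by_cases hnj : n = j
      · subst hnj
        by_cases hl : n < row.length
        · simp [hl, hp]
        · simp [hl, List.getElem?_eq_none (Nat.le_of_not_lt hl)]
      · rw [if_neg hnj]
        have hiff : (j < n ∧ p j ∧ j < row.length) ↔ (j < n + 1 ∧ p j ∧ j < row.length) := by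
          constructor
          · rintro ⟨a, b, c⟩; exact ⟨by omega, b, c⟩
          · rintro ⟨a, b, c⟩
            refine ⟨?_, b, c⟩
            omega
        rw [if_congr hiff rfl rfl]
    · rw [if_neg hp, ih]
      have hiff : (j < n ∧ p j ∧ j < row.length) ↔ (j < n + 1 ∧ p j ∧ j < row.length) := by
        constructor
        · rintro ⟨a, b, c⟩; exact ⟨by omega, b, c⟩
        · rintro ⟨a, b, c⟩
          refine ⟨?_, b, c⟩
          by_cases hjn : j = n
          · subst hjn; exact absurd b hp
          · omega
      rw [if_congr hiff rfl rfl]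

theorem riNb_iff (grid : List (List Int)) (h w r c : Nat) (v : Int) (hr : r < h) (hc : c < w) :
    riHasNeighbor grid h w r c v = true ↔
      ((1 ≤ r ∧ riC grid (r-1) c = v) ∨ (r + 1 < h ∧ riC grid (r+1) c = v) ∨
       (1 ≤ c ∧ riC grid r (c-1) = v) ∨ (c + 1 < w ∧ riC grid r (c+1) = v)) := by
  have e1 : ((r : Int) + -1).toNat = r - 1 := by omega
  have e2 : ((r : Int) + 1).toNat = r + 1 := by omega
  have e3 : ((c : Int) + -1).toNat = c - 1 := by omega
  have e4 : ((c : Int) + 1).toNat = c + 1 := by omega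
  simp only [riHasNeighbor, riC, List.any_cons, List.any_nil, Bool.or_eq_true,
    Bool.and_eq_true, decide_eq_true_eq, beq_iff_eq, e1, e2, e3, e4, Bool.or_false]
  constructor
  · rintro (⟨⟨⟨h1, h2⟩, h3⟩, h4⟩ | ⟨⟨⟨h1, h2⟩, h3⟩, h4⟩ | ⟨⟨⟨h1, h2⟩, h3⟩, h4⟩ | ⟨⟨⟨h1, h2⟩, h3⟩, h4⟩)
    · exact Or.inl ⟨by omega, h4⟩
    · exact Or.inr (Or.inl ⟨by omega, h4⟩)
    · exact Or.inr (Or.inr (Or.inl ⟨by omega, h4⟩))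
    · exact Or.inr (Or.inr (Or.inr ⟨by omega, h4⟩))
  · rintro (⟨h1, h2⟩ | ⟨h1, h2⟩ | ⟨h1, h2⟩ | ⟨h1, h2⟩)
    · exact Or.inl ⟨⟨⟨by omega, by omega⟩, by omega⟩, h2⟩
    · exact Or.inr (Or.inl ⟨⟨⟨by omega, by omega⟩, by omega⟩, h2⟩)
    · exact Or.inr (Or.inr (Or.inl ⟨⟨⟨by omega, by omega⟩, by omega⟩, h2⟩))
    · exact Or.inr (Or.inr (Or.inr ⟨⟨⟨by omega, by omega⟩, by omega⟩, h2⟩))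
theorem riKept_iff (grid : List (List Int)) (bg : Int) (h w r c : Nat)
    (hr : r < h) (hc : c < w) (hv : riC grid r c ≠ bg) :
    ((r, c) ∈ (List.range h).flatMap (fun r => (List.range (w - 1)).flatMap (fun c =>
        if (grid.getD r []).getD c 0 = (grid.getD r []).getD (c+1) 0 ∧ (grid.getD r []).getD (c+1) 0 ≠ bg
        then [(r, c), (r, c+1)] else [])) ++
      (List.range w).flatMap (fun c => (List.range (h - 1)).flatMap (fun r =>
        if (grid.getD r []).getD c 0 = (grid.getD (r+1) []).getD c 0 ∧ (grid.getD (r+1) []).getD c 0 ≠ bg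
        then [(r, c), (r+1, c)] else [])))
    ↔ ((1 ≤ r ∧ riC grid (r-1) c = riC grid r c) ∨ (r + 1 < h ∧ riC grid (r+1) c = riC grid r c) ∨
       (1 ≤ c ∧ riC grid r (c-1) = riC grid r c) ∨ (c + 1 < w ∧ riC grid r (c+1) = riC grid r c)) := by
  simp only [List.mem_append, List.mem_flatMap, List.mem_range, riC] at *
  constructor
  · rintro (⟨r', hr', c', hc', hm⟩ | ⟨c', hc', r', hr', hm⟩)
    · split_ifs at hm with hcond
      · simp only [List.mem_cons, List.mem_singleton, Prod.mk.injEq, List.not_mem_nil, or_false] at hm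
        rcases hm with ⟨he1, he2⟩ | ⟨he1, he2⟩
        · subst he1; subst he2
          exact Or.inr (Or.inr (Or.inr ⟨by omega, hcond.1.symm⟩))
        · subst he1; subst he2
          refine Or.inr (Or.inr (Or.inl ⟨by omega, ?_⟩))
          simpa using hcond.1
      · simp at hm
    · split_ifs at hm with hcond
      · simp only [List.mem_cons, List.mem_singleton, Prod.mk.injEq, List.not_mem_nil, or_false] at hm
        rcases hm with ⟨he1, he2⟩ | ⟨he1, he2⟩
        · subst he1; subst he2
          exact Or.inr (Or.inl ⟨by omega, hcond.1.symm⟩)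
        · subst he1; subst he2
          refine Or.inl ⟨by omega, ?_⟩
          simpa using hcond.1
      · simp at hm
  · rintro (⟨h1, h2⟩ | ⟨h1, h2⟩ | ⟨h1, h2⟩ | ⟨h1, h2⟩)
    · -- up neighbor: vert pair at (r-1, c)
      refine Or.inr ⟨c, hc, r - 1, by omega, ?_⟩
      rw [if_pos ⟨by rw [show r - 1 + 1 = r by omega]; exact h2, by rw [show r - 1 + 1 = r by omega]; exact hv⟩]
      simp [show r - 1 + 1 = r by omega]
    · refine Or.inr ⟨c, hc, r, by omega, ?_⟩
      rw [if_pos ⟨h2.symm, h2 ▸ hv⟩]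
      simp
    · refine Or.inl ⟨r, hr, c - 1, by omega, ?_⟩
      rw [if_pos ⟨by rw [show c - 1 + 1 = c by omega]; exact h2, by rw [show c - 1 + 1 = c by omega]; exact hv⟩]
      simp [show c - 1 + 1 = c by omega]
    · refine Or.inl ⟨r, hr, c, by omega, ?_⟩
      rw [if_pos ⟨h2.symm, h2 ▸ hv⟩]
      simp
-- zeta-reduced form of riInner, as simp leaves the goal after unfolding the port
theorem riInner' (grid : List (List Int)) (bg : Int) (h w r : Nat) (l : List Nat) :
    ∀ res : List (List Int),
    l.foldl (fun result c =>
      if (grid.getD r []).getD c 0 ≠ bg then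
        if ¬ (riHasNeighbor grid h w r c ((grid.getD r []).getD c 0) = true) then
          result.modify r (fun row => row.set c bg)
        else result
      else result) res
    = res.modify r (fun row => l.foldl (fun row c =>
        if riC grid r c ≠ bg ∧ ¬ (riHasNeighbor grid h w r c (riC grid r c) = true)
        then row.set c bg else row) row) :=
  riInner grid bg h w r l

theorem riMain (grid : List (List Int)) (bg : Int)
    (hpre : ∀ row ∈ grid, row.length = (grid.getD 0 []).length) :
    remove_isolated grid bg = remove_isolated_alt grid bg := by
  by_cases hemp : grid.isEmpty
  · unfold remove_isolated remove_isolated_alt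
    rw [if_pos hemp, if_pos hemp]
  · unfold remove_isolated remove_isolated_alt
    rw [if_neg hemp, if_neg hemp]
    simp only [riInner']
    apply List.ext_getElem?
    intro i
    rw [riOuter, List.getElem?_map]
    by_cases hi : i < grid.length
    · rw [if_pos hi, List.getElem?_range hi, List.getElem?_eq_getElem hi]
      simp only [Option.map_some]
      congr 1
      have hrow : grid.getD i [] = grid[i] := by
        rw [List.getD_eq_getElem?_getD, List.getElem?_eq_getElem hi]; rfl
      have hlen : grid[i].length = (grid.getD 0 []).length := hpre _ (List.getElem_mem hi)
      apply List.ext_getElem?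
      intro c
      rw [riRow, List.getElem?_map]
      by_cases hc : c < (grid.getD 0 []).length
      · rw [List.getElem?_range hc]
        simp only [Option.map_some]
        have hclen : c < grid[i].length := by omega
        have hkept : ∀ keptL : List (Nat × Nat), (PySem.Set.contains (PySem.Set.ofList keptL) (i, c) = true) ↔ (i, c) ∈ keptL := by
          intro keptL
          rw [PySem.Set.contains_iff, PySem.Set.mem_ofList]
        rw [show (grid.getD i []).getD c 0 = riC grid i c from rfl]
        by_cases hv : riC grid i c = bg
        · rw [if_neg (fun hcond => hcond.2.1.1 hv), if_pos (Or.inl hv),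
            List.getElem?_eq_getElem hclen]
          have : riC grid i c = grid[i][c] := by
            rw [riC, hrow, List.getD_eq_getElem?_getD, List.getElem?_eq_getElem hclen]; rfl
          exact congrArg some this.symm
        · have hD := (hkept _).trans
            (riKept_iff grid bg grid.length (grid.getD 0 []).length i c hi hc hv)
          by_cases hnb : riHasNeighbor grid grid.length (grid.getD 0 []).length i c (riC grid i c) = true
          · rw [if_neg (fun hcond => hcond.2.1.2 hnb),
              if_pos (Or.inr (hD.mpr ((riNb_iff grid grid.length (grid.getD 0 []).length i c (riC grid i c) hi hc).mp hnb))),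
              List.getElem?_eq_getElem hclen]
            have : riC grid i c = grid[i][c] := by
              rw [riC, hrow, List.getD_eq_getElem?_getD, List.getElem?_eq_getElem hclen]; rfl
            exact congrArg some this.symm
          · rw [if_pos ⟨hc, ⟨hv, hnb⟩, hclen⟩,
              if_neg (fun hcond => hcond.elim (fun h1 => hv h1)
                (fun h2 => hnb ((riNb_iff grid grid.length (grid.getD 0 []).length i c (riC grid i c) hi hc).mpr ((hD).mp h2))))]
      · have h1 : grid[i][c]? = none := List.getElem?_eq_none (by omega)
        have h2 : (List.range (grid.getD 0 []).length)[c]? = none :=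
          List.getElem?_eq_none (by simpa using Nat.le_of_not_lt hc)
        rw [if_neg (fun hcond => hc hcond.1), h1, h2]
        rfl
    · have h1 : grid[i]? = none := List.getElem?_eq_none (Nat.le_of_not_lt hi)
      have h2 : (List.range grid.length)[i]? = none :=
        List.getElem?_eq_none (by simpa using Nat.le_of_not_lt hi)
      rw [if_neg hi, h1, h2]
      rfl

-- ===== VERDICT (by name: the statement is the Claim_ definition above) =====
theorem remove_isolated_spec : Claim_equal_remove_isolated := by
  intro grid bg _ hpre
  exact riMain grid bg hpre
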